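-- pv_equiv track=rewrite | github.com/epibook/epibook.github.io | static/python/longest_nondecreasing_subsequence_nlogn.py | longest_nondecreasing_subsequence_length
-- ===== SOURCE A (Python) =====
-- import bisect
--
-- def longest_nondecreasing_subsequence_length(A):
--     tail_values = []
--     for a in A:
--         it = bisect.bisect(tail_values, a)
--         if it == len(tail_values):
--             tail_values.append(a)
--         else:
--             tail_values[it] = a
--     return len(tail_values)
-- ===== SOURCE B (Python) =====
-- def longest_nondecreasing_subsequence_length(A):
--     # Classic quadratic DP: dp holds (value, length of the longest
--     # nondecreasing subsequence ending at that value's position).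
--     dp = []
--     for a in A:
--         best = 0
--         for (v, d) in dp:
--             if v <= a and d > best:
--                 best = d
--         dp.append((a, best + 1))
--     return max((d for (_, d) in dp), default=0)
-- ===== Notes on version B (the rewrite author's own statement) =====
-- stated objective: alternative
-- what changed: Replaced the patience-sorting tails array maintained with bisect by the classic quadratic dynamic program dp[i] = 1 + max(dp[j] for j < i with A[j] <= A[i]).
import Mathlib
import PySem

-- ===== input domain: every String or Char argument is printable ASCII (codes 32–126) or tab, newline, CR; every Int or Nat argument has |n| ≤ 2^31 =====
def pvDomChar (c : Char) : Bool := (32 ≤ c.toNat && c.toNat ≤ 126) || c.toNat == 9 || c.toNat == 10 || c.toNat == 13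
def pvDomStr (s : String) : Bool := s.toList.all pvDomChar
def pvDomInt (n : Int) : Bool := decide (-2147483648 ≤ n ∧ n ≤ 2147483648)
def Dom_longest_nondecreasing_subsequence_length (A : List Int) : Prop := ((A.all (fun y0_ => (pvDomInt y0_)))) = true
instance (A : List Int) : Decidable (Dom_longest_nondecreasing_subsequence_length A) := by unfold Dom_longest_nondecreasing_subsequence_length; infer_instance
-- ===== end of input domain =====

-- B replaces A's bisect-maintained tails array by the classic quadratic DP over (value, dp) pairs; alternative decomposition, not faster.

-- ===== PORT A =====
-- transliteration of bisect.bisect (= bisect_right): binary search with lo/hi,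
-- mid = (lo+hi)//2; l.getD mid 0 is exact since mid < hi ≤ l.length at every probe
def pvBisect (l : List Int) (x : Int) (lo hi : Nat) : Nat :=
  if _h : lo < hi then
    if x < l.getD ((lo + hi) / 2) 0 then pvBisect l x lo ((lo + hi) / 2)
    else pvBisect l x ((lo + hi) / 2 + 1) hi
  else lo
termination_by hi - lo
decreasing_by all_goals omega

-- loop body of A: insert-or-replace in tail_values
def lndsStep (t : List Int) (a : Int) : List Int :=
  let it := pvBisect t a 0 t.length
  if it = t.length then t ++ [a] else t.set it a

def longest_nondecreasing_subsequence_length (A : List Int) : Int :=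
  ((A.foldl lndsStep []).length : Int)

-- ===== PORT B =====
-- loop body of B: append (a, best + 1) where best scans previous pairs
def dpStep (dp : List (Int × Int)) (a : Int) : List (Int × Int) :=
  let best := dp.foldl (fun b p => if p.1 ≤ a ∧ b < p.2 then p.2 else b) 0
  dp ++ [(a, best + 1)]

-- max((d for (_, d) in dp), default=0); foldl max 0 is exact here since every d ≥ 1
def longest_nondecreasing_subsequence_length_alt (A : List Int) : Int :=
  ((A.foldl dpStep []).map Prod.snd).foldl max 0

-- ===== PRECONDITION & SPEC =====
def Spec_longest_nondecreasing_subsequence_length (A : List Int) (out : Int) : Prop := out = longest_nondecreasing_subsequence_length_alt A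
instance (A : List Int) (out : Int) : Decidable (Spec_longest_nondecreasing_subsequence_length A out) := by unfold Spec_longest_nondecreasing_subsequence_length; infer_instance

-- ===== CLAIM (what is proved, stated in full; the proofs are below) =====
def Claim_equal_longest_nondecreasing_subsequence_length : Prop := ∀ (A : List Int), Dom_longest_nondecreasing_subsequence_length A → Spec_longest_nondecreasing_subsequence_length A (longest_nondecreasing_subsequence_length A)

-- ===== LEMMAS AND PROOFS =====

-- t is nondecreasing, stated over getD so every index manipulation stays in one world
def SortedLe (t : List Int) : Prop :=
  ∀ i j, i ≤ j → j < t.length → t.getD i 0 ≤ t.getD j 0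

-- the coupling invariant between A's tails list t and B's pair list dp:
-- lengths agree with the running maximum dp value, and t.getD k 0 is the least
-- value at which some pair of dp length ≥ k+1 ends
def LndsInv (t : List Int) (dp : List (Int × Int)) : Prop :=
  SortedLe t ∧
  (t.length : Int) = (dp.map Prod.snd).foldl max 0 ∧
  ∀ k, k < t.length →
    (∃ p ∈ dp, (k : Int) + 1 ≤ p.2 ∧ p.1 = t.getD k 0) ∧
    (∀ p ∈ dp, (k : Int) + 1 ≤ p.2 → t.getD k 0 ≤ p.1)

lemma getD_snoc (t : List Int) (a : Int) (i : Nat) :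
    (t ++ [a]).getD i 0 = if i < t.length then t.getD i 0 else if i = t.length then a else 0 := by
  rcases lt_trichotomy i t.length with h | h | h
  · rw [if_pos h]
    simp [List.getD_eq_getElem?_getD, List.getElem?_append_left h]
  · subst h
    simp [List.getD_eq_getElem?_getD]
  · rw [if_neg (by omega), if_neg (by omega)]
    rw [List.getD_eq_getElem?_getD, List.getElem?_eq_none_iff.mpr (by simp; omega)]
    rfl

lemma getD_set (t : List Int) (a : Int) (n i : Nat) (hi : i < t.length) :
    (t.set n a).getD i 0 = if i = n then a else t.getD i 0 := by
  rcases eq_or_ne i n with h | h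
  · subst h
    simp [List.getD_eq_getElem?_getD, hi]
  · simp [List.getD_eq_getElem?_getD, List.getElem?_set_ne (Ne.symm h), h]

lemma foldl_max_spec (l : List Int) : ∀ m0 : Int,
    m0 ≤ l.foldl max m0 ∧ (∀ y ∈ l, y ≤ l.foldl max m0) ∧
      (l.foldl max m0 = m0 ∨ l.foldl max m0 ∈ l) := by
  induction l with
  | nil => intro m0; simp
  | cons x xs ih =>
    intro m0
    simp only [List.foldl_cons]
    obtain ⟨h1, h2, h3⟩ := ih (max m0 x)
    refine ⟨le_trans (le_max_left _ _) h1, ?_, ?_⟩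
    · intro y hy
      rcases List.mem_cons.mp hy with rfl | hy
      · exact le_trans (le_max_right _ _) h1
      · exact h2 y hy
    · rcases h3 with h3 | h3
      · rcases max_choice m0 x with hc | hc
        · left; rw [h3, hc]
        · right; exact List.mem_cons.mpr (Or.inl (by rw [h3, hc]))
      · right; exact List.mem_cons.mpr (Or.inr h3)

lemma foldl_best_mono (a : Int) (l : List (Int × Int)) : ∀ b0 : Int,
    b0 ≤ l.foldl (fun b p => if p.1 ≤ a ∧ b < p.2 then p.2 else b) b0 := by
  induction l with
  | nil => intro b0; simp
  | cons q qs ih =>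
    intro b0
    simp only [List.foldl_cons]
    exact le_trans (by split_ifs with h <;> omega) (ih _)

lemma foldl_best_spec (a : Int) (l : List (Int × Int)) : ∀ b0 : Int,
    0 ≤ b0 →
    (0 ≤ l.foldl (fun b p => if p.1 ≤ a ∧ b < p.2 then p.2 else b) b0 ∧
     (∀ p ∈ l, p.1 ≤ a → p.2 ≤ l.foldl (fun b p => if p.1 ≤ a ∧ b < p.2 then p.2 else b) b0) ∧
     (l.foldl (fun b p => if p.1 ≤ a ∧ b < p.2 then p.2 else b) b0 = b0 ∨
       ∃ p ∈ l, p.1 ≤ a ∧ p.2 = l.foldl (fun b p => if p.1 ≤ a ∧ b < p.2 then p.2 else b) b0)) := by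
  induction l with
  | nil => intro b0 hb0; simpa using hb0
  | cons q qs ih =>
    intro b0 hb0
    simp only [List.foldl_cons]
    obtain ⟨h1, h2, h3⟩ := ih (if q.1 ≤ a ∧ b0 < q.2 then q.2 else b0)
      (by split_ifs with h <;> omega)
    refine ⟨h1, ?_, ?_⟩
    · intro p hp hpa
      rcases List.mem_cons.mp hp with rfl | hp
      · refine le_trans ?_ (foldl_best_mono a qs _)
        by_cases hb : b0 < p.2
        · rw [if_pos ⟨hpa, hb⟩]
        · rw [if_neg (fun hc => hb hc.2)]
          omega
      · exact h2 p hp hpa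
    · rcases h3 with h3 | h3
      · by_cases hq : q.1 ≤ a ∧ b0 < q.2
        · right
          refine ⟨q, List.mem_cons_self, hq.1, ?_⟩
          rw [h3, if_pos hq]
        · left
          rw [h3, if_neg hq]
      · obtain ⟨p, hp, hpa, hpd⟩ := h3
        right
        exact ⟨p, List.mem_cons.mpr (Or.inr hp), hpa, hpd⟩

lemma pvBisect_spec (l : List Int) (x : Int) :
    ∀ fuel lo hi, hi - lo ≤ fuel → lo ≤ hi → hi ≤ l.length →
    SortedLe l →
    (∀ i, i < lo → l.getD i 0 ≤ x) →
    (∀ i, hi ≤ i → i < l.length → x < l.getD i 0) →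
    (pvBisect l x lo hi ≤ hi ∧
     (∀ i, i < pvBisect l x lo hi → l.getD i 0 ≤ x) ∧
     (∀ i, pvBisect l x lo hi ≤ i → i < l.length → x < l.getD i 0)) := by
  intro fuel
  induction fuel with
  | zero =>
    intro lo hi hf hlh hhl _ hlow hhigh
    have hlo : lo = hi := by omega
    subst hlo
    have hrw : pvBisect l x lo lo = lo := by rw [pvBisect]; simp
    rw [hrw]
    exact ⟨le_refl _, hlow, fun i h1 h2 => hhigh i h1 h2⟩
  | succ fuel ih =>
    intro lo hi hf hlh hhl hs hlow hhigh
    by_cases h : lo < hi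
    · rw [pvBisect, dif_pos h]
      by_cases hc : x < l.getD ((lo + hi) / 2) 0
      · rw [if_pos hc]
        have hres := ih lo ((lo + hi) / 2) (by omega) (by omega) (by omega) hs hlow
          (fun i h1 h2 => lt_of_lt_of_le hc (hs ((lo + hi) / 2) i h1 h2))
        exact ⟨le_trans hres.1 (by omega), hres.2.1, hres.2.2⟩
      · rw [if_neg hc]
        exact ih ((lo + hi) / 2 + 1) hi (by omega) (by omega) hhl hs
          (fun i h1 => le_trans (hs i ((lo + hi) / 2) (by omega) (by omega)) (not_lt.mp hc)) hhigh
    · rw [pvBisect, dif_neg h]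
      exact ⟨hlh, hlow, fun i h1 h2 => hhigh i (by omega) h2⟩

-- one step of both loops preserves the coupling invariant
lemma step_inv (t : List Int) (dp : List (Int × Int)) (a : Int) (h : LndsInv t dp) :
    LndsInv (lndsStep t a) (dpStep dp a) := by
  obtain ⟨hs, hlen, hmin⟩ := h
  simp only [lndsStep, dpStep]
  set n := pvBisect t a 0 t.length with hn
  set best := dp.foldl (fun b p => if p.1 ≤ a ∧ b < p.2 then p.2 else b) 0 with hb
  obtain ⟨hnle, hnlow, hnhigh⟩ :=
    pvBisect_spec t a t.length 0 t.length (by omega) (by omega) (le_refl _) hs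
      (fun i hi => absurd hi (Nat.not_lt_zero i))
      (fun i h1 h2 => absurd h2 (by omega))
  obtain ⟨hb0, hbub, hbmem⟩ := foldl_best_spec a dp 0 (le_refl 0)
  have hdub : ∀ p ∈ dp, p.2 ≤ ((dp.map Prod.snd).foldl max 0) := by
    intro p hp
    exact (foldl_max_spec (dp.map Prod.snd) 0).2.1 p.2 (List.mem_map_of_mem hp)
  -- key fact: the bisect position equals B's best
  have hkey : (n : Int) = best := by
    have h1 : best ≤ (n : Int) := by
      rcases hbmem with h0 | ⟨p, hp, hpa, hpd⟩
      · omega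
      · by_cases hb1 : best ≤ 0
        · omega
        · have hkl : (best - 1).toNat < t.length := by
            have := hdub p hp
            omega
          have hmn := (hmin _ hkl).2 p hp (by omega)
          have hta : t.getD (best - 1).toNat 0 ≤ a := le_trans hmn hpa
          have hlt : (best - 1).toNat < n := by
            by_contra hcon
            exact absurd hta (not_le.mpr (hnhigh _ (by omega) hkl))
          omega
    have h2 : (n : Int) ≤ best := by
      by_cases hn0 : n = 0
      · omega
      · have hkl : n - 1 < t.length := by omega
        obtain ⟨p, hp, hpd, hpv⟩ := (hmin _ hkl).1
        have hta : p.1 ≤ a := by rw [hpv]; exact hnlow _ (by omega)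
        have hub := hbub p hp hta
        omega
    omega
  have hmaxapp : ((dp ++ [(a, best + 1)]).map Prod.snd).foldl max 0
      = max ((dp.map Prod.snd).foldl max 0) (best + 1) := by
    simp [List.foldl_append]
  by_cases hcase : n = t.length
  · -- bisect ran off the end: append a to tails, dp gains (a, best+1)
    rw [if_pos hcase]
    refine ⟨?_, ?_, ?_⟩
    · intro i j hij hj
      simp only [List.length_append, List.length_cons, List.length_nil] at hj
      rw [getD_snoc, getD_snoc]
      by_cases hjl : j < t.length
      · have hil : i < t.length := by omega
        rw [if_pos hjl, if_pos hil]
        exact hs i j hij hjl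
      · have hjL : j = t.length := by omega
        rw [if_neg hjl, if_pos hjL]
        by_cases hil : i < t.length
        · rw [if_pos hil]
          exact hnlow i (by omega)
        · have hiL : i = t.length := by omega
          rw [if_neg hil, if_pos hiL]
    · rw [hmaxapp]
      simp only [List.length_append, List.length_cons, List.length_nil]
      push_cast
      omega
    · intro k hk
      simp only [List.length_append, List.length_cons, List.length_nil] at hk
      constructor
      · by_cases hkl : k < t.length
        · obtain ⟨p, hp, hpd, hpv⟩ := (hmin _ hkl).1
          refine ⟨p, List.mem_append.mpr (Or.inl hp), hpd, ?_⟩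
          rw [getD_snoc, if_pos hkl]; exact hpv
        · have hkL : k = t.length := by omega
          refine ⟨(a, best + 1), List.mem_append.mpr (Or.inr (by simp)), ?_, ?_⟩
          · show (k : Int) + 1 ≤ best + 1
            omega
          · have hnk : ¬ k < t.length := by omega
            rw [getD_snoc, if_neg hnk, if_pos hkL]
      · intro p hp hpd
        rcases List.mem_append.mp hp with hpo | hpn
        · by_cases hkl : k < t.length
          · rw [getD_snoc, if_pos hkl]
            exact (hmin _ hkl).2 p hpo hpd
          · exfalso
            have := hdub p hpo
            omega
        · have hpe : p = (a, best + 1) := by simpa using hpn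
          subst hpe
          simp only at hpd
          rw [getD_snoc]
          by_cases hkl : k < t.length
          · rw [if_pos hkl]
            exact hnlow k (by omega)
          · have hkL : k = t.length := by omega
            rw [if_neg hkl, if_pos hkL]
  · -- bisect found a larger tail: replace t[n] by a
    rw [if_neg hcase]
    have hnl : n < t.length := by omega
    have hanext : a < t.getD n 0 := hnhigh n (le_refl _) hnl
    refine ⟨?_, ?_, ?_⟩
    · intro i j hij hj
      simp only [List.length_set] at hj
      rw [getD_set t a n i (by omega), getD_set t a n j hj]
      by_cases h1 : i = n
      · rw [if_pos h1]
        by_cases h2 : j = n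
        · rw [if_pos h2]
        · rw [if_neg h2]
          exact le_of_lt (hnhigh j (by omega) hj)
      · rw [if_neg h1]
        by_cases h2 : j = n
        · rw [if_pos h2]
          exact hnlow i (by omega)
        · rw [if_neg h2]
          exact hs i j hij hj
    · rw [hmaxapp]
      simp only [List.length_set]
      omega
    · intro k hk
      simp only [List.length_set] at hk
      constructor
      · by_cases hkn : k = n
        · refine ⟨(a, best + 1), List.mem_append.mpr (Or.inr (by simp)), ?_, ?_⟩
          · show (k : Int) + 1 ≤ best + 1
            omega
          · rw [getD_set t a n k hk, if_pos hkn]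
        · obtain ⟨p, hp, hpd, hpv⟩ := (hmin _ hk).1
          refine ⟨p, List.mem_append.mpr (Or.inl hp), hpd, ?_⟩
          rw [getD_set t a n k hk, if_neg hkn]; exact hpv
      · intro p hp hpd
        rcases List.mem_append.mp hp with hpo | hpn
        · rw [getD_set t a n k hk]
          by_cases hkn : k = n
          · rw [if_pos hkn]
            have hm := (hmin _ hnl).2 p hpo (by omega)
            exact le_of_lt (lt_of_lt_of_le hanext hm)
          · rw [if_neg hkn]
            exact (hmin _ hk).2 p hpo hpd
        · have hpe : p = (a, best + 1) := by simpa using hpn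
          subst hpe
          simp only at hpd
          rw [getD_set t a n k hk]
          by_cases hkn : k = n
          · rw [if_pos hkn]
          · rw [if_neg hkn]
            exact hnlow k (by omega)

lemma fold_inv (A : List Int) : ∀ t dp, LndsInv t dp →
    LndsInv (A.foldl lndsStep t) (A.foldl dpStep dp) := by
  induction A with
  | nil => intro t dp h; exact h
  | cons a as ih =>
    intro t dp h
    exact ih _ _ (step_inv t dp a h)

-- ===== VERDICT (by name: the statement is the Claim_ definition above) =====
theorem longest_nondecreasing_subsequence_length_spec : Claim_equal_longest_nondecreasing_subsequence_length := by
  intro A _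
  unfold Spec_longest_nondecreasing_subsequence_length
  unfold longest_nondecreasing_subsequence_length longest_nondecreasing_subsequence_length_alt
  have hinit : LndsInv [] [] := by
    refine ⟨?_, by simp, ?_⟩
    · intro i j _ hj; simp at hj
    · intro k hk; simp at hk
  exact (fold_inv A [] [] hinit).2.1
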